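-- pv_equiv track=rewrite | github.com/joluben/IoT-Dev-Sim | backend/app/connection_clients.py | _sanitize_host
-- ===== SOURCE A (Python) =====
-- def _sanitize_host(host: str) -> str:
--     """Elimina esquemas tipo mqtt://, tcp://, ssl://, ws:// del host si vienen incluidos"""
--     if not host:
--         return host
--     prefixes = ['mqtt://', 'mqtts://', 'tcp://', 'ssl://', 'ws://', 'wss://']
--     for p in prefixes:
--         if host.startswith(p):
--             return host[len(p):]
--     return host
-- ===== SOURCE B (Python) =====
-- _SCHEMES = frozenset({'mqtt', 'mqtts', 'tcp', 'ssl', 'ws', 'wss'})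
--
--
-- def _sanitize_host(host: str) -> str:
--     """Elimina esquemas tipo mqtt://, tcp://, ssl://, ws:// del host si vienen incluidos"""
--     if not host:
--         return host
--     idx = host.find('://')
--     if idx != -1 and host[:idx] in _SCHEMES:
--         return host[idx + 3:]
--     return host
-- ===== Notes on version B (the rewrite author's own statement) =====
-- stated objective: idiomatic
-- what changed: Replaces the ordered per-prefix startswith scan over six full scheme prefixes by a single find of the separator plus one frozenset membership test on the bare scheme name.
import Mathlib
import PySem

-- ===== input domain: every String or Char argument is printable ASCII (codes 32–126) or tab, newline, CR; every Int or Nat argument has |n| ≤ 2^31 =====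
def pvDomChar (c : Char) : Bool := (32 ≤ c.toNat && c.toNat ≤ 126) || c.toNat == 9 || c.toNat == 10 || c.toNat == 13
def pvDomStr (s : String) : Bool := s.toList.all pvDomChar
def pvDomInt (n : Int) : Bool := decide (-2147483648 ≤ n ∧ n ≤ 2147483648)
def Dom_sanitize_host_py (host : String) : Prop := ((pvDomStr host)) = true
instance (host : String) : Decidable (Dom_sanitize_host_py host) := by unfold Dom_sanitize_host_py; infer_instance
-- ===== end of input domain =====

-- B replaces A's ordered per-prefix startswith scan by one find('://') plus a
-- frozenset membership test on the bare scheme name (idiomatic; same result).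

-- ===== PORT A =====
-- the 'for p in prefixes: if host.startswith(p): return host[len(p):]' loop
def pvLoopA (host : String) : List String → String
  | [] => host
  | p :: ps =>
      if PySem.Str.startswith host p then PySem.Str.slice host (some (PySem.Str.len p)) none
      else pvLoopA host ps

def sanitize_host_py (host : String) : String :=
  if host = "" then host
  else pvLoopA host ["mqtt://", "mqtts://", "tcp://", "ssl://", "ws://", "wss://"]

-- ===== PORT B =====
def pvSchemes : PySem.Set String := PySem.Set.ofList ["mqtt", "mqtts", "tcp", "ssl", "ws", "wss"]

def sanitize_host_py_alt (host : String) : String :=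
  if host = "" then host
  else
    let idx := PySem.Str.find host "://"
    if idx ≠ -1 ∧ PySem.Set.contains pvSchemes (PySem.Str.slice host none (some idx)) = true then
      PySem.Str.slice host (some (idx + 3)) none
    else host

-- ===== PRECONDITION & SPEC =====
def Spec_sanitize_host_py (host : String) (out : String) : Prop := out = sanitize_host_py_alt host
instance (host : String) (out : String) : Decidable (Spec_sanitize_host_py host out) := by unfold Spec_sanitize_host_py; infer_instance

-- ===== CLAIM (what is proved, stated in full; the proofs are below) =====
def Claim_equal_sanitize_host_py : Prop := ∀ (host : String), Dom_sanitize_host_py host → Spec_sanitize_host_py host (sanitize_host_py host)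

-- ===== LEMMAS AND PROOFS =====

-- On a host of the shape scheme ++ "://" ++ rest with no ':' in the scheme,
-- find('://') points exactly at the end of the scheme.
theorem pv_find_at_scheme (scheme rest : List Char) (h : ':' ∉ scheme) :
    PySem.Chars.find (scheme ++ [':', '/', '/'] ++ rest) [':', '/', '/'] = (scheme.length : Int) := by
  set s := scheme ++ [':', '/', '/'] ++ rest with hs
  have hinf : [':', '/', '/'] <:+: s := ⟨scheme, rest, by simp [hs]⟩
  have h0 : 0 ≤ PySem.Chars.find s [':', '/', '/'] := (PySem.Chars.find_nonneg_iff s _).mpr hinf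
  obtain ⟨hocc, hmin⟩ := PySem.Chars.find_spec h0
  set j := (PySem.Chars.find s [':', '/', '/']).toNat with hj
  have hje : j = scheme.length := by
    rcases lt_trichotomy j scheme.length with hlt | heq | hgt
    · exfalso
      have hdrop : s.drop j = scheme.drop j ++ ([':', '/', '/'] ++ rest) := by
        rw [hs, List.append_assoc, List.drop_append_of_le_length (le_of_lt hlt)]
      have hcons : scheme.drop j = scheme[j] :: scheme.drop (j + 1) := List.drop_eq_getElem_cons hlt
      obtain ⟨t, ht⟩ := hocc
      rw [hdrop, hcons] at ht
      have : ':' = scheme[j] := by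
        have := congrArg (fun l => l.head?) ht
        simp only [List.head?_cons, List.head?_append] at this
        simpa using this
      exact h (this ▸ List.getElem_mem hlt)
    · exact heq
    · exfalso
      exact hmin scheme.length hgt ⟨rest, by rw [hs, List.append_assoc, List.drop_append_of_le_length le_rfl]; simp⟩
  have : PySem.Chars.find s [':', '/', '/'] = (j : Int) := by omega
  rw [this, hje]

-- If find = j ≥ 0 and host[:j] is the scheme, then host starts with scheme ++ "://".
theorem pv_take_find_prefix (cs scheme : List Char) {j : Int}
    (hf : PySem.Chars.find cs [':', '/', '/'] = j) (h0 : 0 ≤ j)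
    (ht : cs.take j.toNat = scheme) :
    (scheme ++ [':', '/', '/']) <+: cs := by
  obtain ⟨hocc, -⟩ := PySem.Chars.find_spec (s := cs) (sub := [':', '/', '/']) (by rw [hf]; exact h0)
  rw [hf] at hocc
  obtain ⟨t, htl⟩ := hocc
  refine ⟨t, ?_⟩
  calc (scheme ++ [':', '/', '/']) ++ t = cs.take j.toNat ++ ([':', '/', '/'] ++ t) := by rw [ht, List.append_assoc]
    _ = cs.take j.toNat ++ cs.drop j.toNat := by rw [htl]
    _ = cs := List.take_append_drop _ _

-- A positive case: host starts with scheme ++ "://"  ⇒  B's find and slices line up.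
theorem pv_case_pos (host : String) (scheme : List Char) (h1 : ':' ∉ scheme)
    (hpre : (scheme ++ [':', '/', '/']) <+: host.toList) :
    PySem.Str.find host "://" = (scheme.length : Int) ∧
    (PySem.Str.slice host none (some (scheme.length : Int))).toList = scheme := by
  obtain ⟨rest, hrest⟩ := hpre
  rw [List.append_assoc] at hrest
  constructor
  · rw [PySem.Str.find_eq, ← hrest]
    have : "://".toList = [':', '/', '/'] := by decide
    rw [this, ← List.append_assoc]
    exact pv_find_at_scheme scheme rest h1
  · rw [PySem.Str.toList_slice, PySem.Chars.slice_eq_listSlice,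
      PySem.List.slice_to _ (by positivity)]
    rw [← hrest]
    simp

-- A matched prefix p = sch ++ "://": A's return value equals B's whole result.
theorem pv_pos (host p sch : String) (hplist : p.toList = sch.toList ++ [':', '/', '/'])
    (hn : ':' ∉ sch.toList) (hmem : PySem.Set.contains pvSchemes sch = true)
    (hpre : p.toList <+: host.toList) (hemp : ¬ host = "") :
    PySem.Str.slice host (some (PySem.Str.len p)) none = sanitize_host_py_alt host := by
  obtain ⟨hf, hsl⟩ := pv_case_pos host sch.toList hn (hplist ▸ hpre)
  have hslice : PySem.Str.slice host none (some ((sch.toList.length : Int))) = sch :=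
    String.toList_inj.mp hsl
  have hlen : PySem.Str.len p = (sch.toList.length : Int) + 3 := by
    rw [PySem.Str.len_eq, hplist]
    simp
  unfold sanitize_host_py_alt
  rw [if_neg hemp]
  simp only [hf, hslice]
  rw [if_pos ⟨by omega, hmem⟩, hlen]

theorem sanitize_host_py_eq (host : String) : sanitize_host_py host = sanitize_host_py_alt host := by
  by_cases hemp : host = ""
  · simp [sanitize_host_py, sanitize_host_py_alt, hemp]
  · unfold sanitize_host_py pvLoopA
    simp only [if_neg hemp]
    have hsw : ∀ p : String, PySem.Str.startswith host p = true ↔ p.toList <+: host.toList := by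
      intro p; rw [PySem.Str.startswith_eq]; exact PySem.Chars.startswith_iff _ _
    by_cases h1 : PySem.Str.startswith host "mqtt://" = true
    · rw [if_pos h1]
      exact pv_pos host "mqtt://" "mqtt" (by decide) (by decide) (by decide) ((hsw _).mp h1) hemp
    rw [if_neg h1]
    unfold pvLoopA
    by_cases h2 : PySem.Str.startswith host "mqtts://" = true
    · rw [if_pos h2]
      exact pv_pos host "mqtts://" "mqtts" (by decide) (by decide) (by decide) ((hsw _).mp h2) hemp
    rw [if_neg h2]
    unfold pvLoopA
    by_cases h3 : PySem.Str.startswith host "tcp://" = true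
    · rw [if_pos h3]
      exact pv_pos host "tcp://" "tcp" (by decide) (by decide) (by decide) ((hsw _).mp h3) hemp
    rw [if_neg h3]
    unfold pvLoopA
    by_cases h4 : PySem.Str.startswith host "ssl://" = true
    · rw [if_pos h4]
      exact pv_pos host "ssl://" "ssl" (by decide) (by decide) (by decide) ((hsw _).mp h4) hemp
    rw [if_neg h4]
    unfold pvLoopA
    by_cases h5 : PySem.Str.startswith host "ws://" = true
    · rw [if_pos h5]
      exact pv_pos host "ws://" "ws" (by decide) (by decide) (by decide) ((hsw _).mp h5) hemp
    rw [if_neg h5]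
    unfold pvLoopA
    by_cases h6 : PySem.Str.startswith host "wss://" = true
    · rw [if_pos h6]
      exact pv_pos host "wss://" "wss" (by decide) (by decide) (by decide) ((hsw _).mp h6) hemp
    rw [if_neg h6]
    unfold pvLoopA
    -- no prefix matched: show B's condition is false, so B also returns host
    unfold sanitize_host_py_alt
    rw [if_neg hemp]
    rw [if_neg ?_]
    rintro ⟨hne, hc⟩
    set idx := PySem.Str.find host "://" with hidx
    have h0 : 0 ≤ idx := by
      have := PySem.Chars.neg_one_le_find host.toList "://".toList
      rw [← PySem.Str.find_eq, ← hidx] at this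
      omega
    have hfc : PySem.Chars.find host.toList [':', '/', '/'] = idx := by
      rw [hidx, PySem.Str.find_eq]; rfl
    have htake : (PySem.Str.slice host none (some idx)).toList = host.toList.take idx.toNat := by
      rw [PySem.Str.toList_slice, PySem.Chars.slice_eq_listSlice, PySem.List.slice_to _ h0]
    have hmem : PySem.Str.slice host none (some idx) ∈
        ["mqtt", "mqtts", "tcp", "ssl", "ws", "wss"] := by
      have hps : pvSchemes = ["mqtt", "mqtts", "tcp", "ssl", "ws", "wss"] := by decide
      rw [hps] at hc
      simpa [PySem.Set.contains] using hc
    have hpref : ∀ sch : String, PySem.Str.slice host none (some idx) = sch →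
        (sch.toList ++ [':', '/', '/']) <+: host.toList := by
      intro sch hsch
      refine pv_take_find_prefix host.toList sch.toList hfc h0 ?_
      rw [← htake, hsch]
    simp only [List.mem_cons, List.not_mem_nil, or_false] at hmem
    rcases hmem with h | h | h | h | h | h
    · exact h1 ((hsw _).mpr (by simpa using hpref _ h))
    · exact h2 ((hsw _).mpr (by simpa using hpref _ h))
    · exact h3 ((hsw _).mpr (by simpa using hpref _ h))
    · exact h4 ((hsw _).mpr (by simpa using hpref _ h))
    · exact h5 ((hsw _).mpr (by simpa using hpref _ h))
    · exact h6 ((hsw _).mpr (by simpa using hpref _ h))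

-- ===== VERDICT (by name: the statement is the Claim_ definition above) =====
theorem sanitize_host_py_spec : Claim_equal_sanitize_host_py := by
  intro host _
  exact sanitize_host_py_eq host
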